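-- pv_equiv track=rewrite | github.com/demokratikollen/demokratikollen | app/riksdagen_sql/postgresify.py | statements
-- ===== SOURCE A (Python) =====
-- VALID_COMMANDS = ["INSERT"]
--
-- def starts_with_command(s):
--     """Checks whether a string starts with an SQL command.
--
--     Args:
--         s (str): The string to search for valid commands.
--
--     Returns:
--         True iff `s.lstrip()` starts with one of the supported commands.
--     """
--     return any(s.lstrip().startswith(cmd) for cmd in VALID_COMMANDS)
--
-- def statements(f):
--     """Returns a generator with statements found in a file-like object.
--
--     Functionality builds on two important assumptions:
--
--     *   The file `f` must contains only SQL statements, and only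
--         those supported by :func:`starts_with_command`.
--     *   Each statement starts on a new line.
--
--     Args:
--         f (file-like object): The source of statements.
--
--     Returns:
--         A generator object, yielding strings with statements.
--     """
--     in_stmt = False
--     lines = []
--
--     for line in f:
--         is_stmt_start = starts_with_command(line)
--
--         if in_stmt and is_stmt_start:
--             yield ''.join(lines)
--             lines = []
--
--         in_stmt = in_stmt or is_stmt_start
--
--         if in_stmt:
--             lines.append(line)
--
--     if in_stmt:
--         yield ''.join(lines)
-- ===== SOURCE B (Python) =====
-- VALID_COMMANDS = ["INSERT"]
--
-- def starts_with_command(s):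
--     return any(s.lstrip().startswith(cmd) for cmd in VALID_COMMANDS)
--
-- def statements(f):
--     lines = list(f)
--     starts = [i for i, line in enumerate(lines) if starts_with_command(line)]
--     ends = starts[1:] + [len(lines)]
--     for a, b in zip(starts, ends):
--         yield ''.join(lines[a:b])
-- ===== Notes on version B (the rewrite author's own statement) =====
-- stated objective: simpler
-- what changed: B replaces A's stateful in_stmt flag and line accumulator with a two-phase decomposition: compute the list of boundary indices where a command line starts, then emit the join of each slice between consecutive boundaries (last slice runs to the end).
import Mathlib
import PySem

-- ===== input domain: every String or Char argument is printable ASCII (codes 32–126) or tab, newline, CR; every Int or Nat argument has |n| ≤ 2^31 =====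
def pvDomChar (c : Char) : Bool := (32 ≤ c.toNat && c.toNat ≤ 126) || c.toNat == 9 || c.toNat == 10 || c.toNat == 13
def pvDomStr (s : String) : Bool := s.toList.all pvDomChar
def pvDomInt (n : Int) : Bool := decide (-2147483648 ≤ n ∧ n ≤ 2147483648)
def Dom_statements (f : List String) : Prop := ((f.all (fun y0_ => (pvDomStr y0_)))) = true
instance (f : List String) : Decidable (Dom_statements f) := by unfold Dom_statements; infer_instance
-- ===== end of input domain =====

-- B replaces A's stateful flag/accumulator loop by computing the boundary indices once
-- and slicing the line list between consecutive boundaries (objective: simpler decomposition).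

-- ===== PORT A =====
-- helper starts_with_command
def swcP (s : String) : Bool :=
  (["INSERT"] : List String).any (fun cmd => PySem.Str.startswith (PySem.Str.lstrip s) cmd)

-- the generator's for-loop, state = (in_stmt, lines, yielded-so-far)
def statementsLoop : List String → Bool → List String → List String → List String
  | [], inStmt, lines, out => if inStmt then out ++ [PySem.Str.join "" lines] else out
  | l :: rest, inStmt, lines, out =>
      let isStart := swcP l
      let out' := if inStmt && isStart then out ++ [PySem.Str.join "" lines] else out
      let lines' := if inStmt && isStart then ([] : List String) else lines
      let inStmt' := inStmt || isStart
      let lines'' := if inStmt' then lines' ++ [l] else lines'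
      statementsLoop rest inStmt' lines'' out'

def statements (f : List String) : List String := statementsLoop f false [] []

-- ===== PORT B =====
-- starts = [i for i, line in enumerate(lines) if starts_with_command(line)];
-- the indices produced are nonnegative, so lines[a:b] is PySem.List.slice with those Int bounds.
def statements_alt (f : List String) : List String :=
  let starts := ((PySem.List.enumerate f).filter (fun p => swcP p.2)).map (·.1)
  let ends := starts.tail ++ [(f.length : Int)]
  (starts.zip ends).map (fun p => PySem.Str.join "" (PySem.List.slice f (some p.1) (some p.2)))

-- ===== PRECONDITION & SPEC =====
def Spec_statements (f : List String) (out : List String) : Prop := out = statements_alt f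
instance (f : List String) (out : List String) : Decidable (Spec_statements f out) := by unfold Spec_statements; infer_instance

-- ===== CLAIM (what is proved, stated in full; the proofs are below) =====
def Claim_equal_statements : Prop := ∀ (f : List String), Dom_statements f → Spec_statements f (statements f)

-- ===== LEMMAS AND PROOFS =====

def joinS (ls : List String) : String := PySem.Str.join "" ls

-- boundary indices of l when enumeration starts at s
def SF (s : Int) (l : List String) : List Int :=
  ((PySem.List.enumerate l s).filter (fun p => swcP p.2)).map (·.1)

-- B's slice-and-join step, abstracted over the boundary list
def outMap (f : List String) (S : List Int) : List String :=
  (S.zip (S.tail ++ [(f.length : Int)])).map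
    (fun p => PySem.Str.join "" (PySem.List.slice f (some p.1) (some p.2)))

theorem alt_unfold (f : List String) : statements_alt f = outMap f (SF 0 f) := rfl

theorem SF_nil (s : Int) : SF s [] = [] := by simp [SF, PySem.List.enumerate]

theorem SF_cons (s : Int) (y : String) (l : List String) :
    SF s (y :: l) = if swcP y then s :: SF (s+1) l else SF (s+1) l := by
  simp [SF, PySem.List.enumerate_cons]
  split <;> simp_all

theorem SF_succ (l : List String) : ∀ s : Int, SF (s+1) l = (SF s l).map (· + 1) := by
  induction l with
  | nil => intro s; simp [SF_nil]
  | cons y l ih =>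
      intro s
      rw [SF_cons, SF_cons, ih (s+1)]
      split <;> simp

theorem SF_nonneg (l : List String) : ∀ s a : Int, 0 ≤ s → a ∈ SF s l → 0 ≤ a := by
  induction l with
  | nil => intro s a _ h; simp [SF_nil] at h
  | cons y l ih =>
      intro s a hs h
      rw [SF_cons] at h
      split at h
      · rcases List.mem_cons.1 h with rfl | h
        · exact hs
        · exact ih (s+1) a (by omega) h
      · exact ih (s+1) a (by omega) h

theorem SF_head (l : List String) : ∀ s : Int,
    (SF s l).headD (s + (l.length : Int)) =
      s + ((l.takeWhile (fun y => !swcP y)).length : Int) := by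
  induction l with
  | nil => intro s; simp [SF_nil]
  | cons y l ih =>
      intro s
      rw [SF_cons]
      by_cases h : swcP y
      · simp [h, *]
      · rw [if_neg h]
        have h1 : s + ((y :: l).length : Int) = (s+1) + (l.length : Int) := by
          simp; omega
        have h2 : (y :: l).takeWhile (fun y => !swcP y) = y :: l.takeWhile (fun y => !swcP y) := by
          simp [List.takeWhile_cons, h]
        rw [h2, h1, ih (s+1)]
        simp only [List.length_cons]
        push_cast
        omega

theorem slice_shift (y : String) (l : List String) (a b : Int) (ha : 0 ≤ a) (hb : 0 ≤ b) :
    PySem.List.slice (y :: l) (some (a+1)) (some (b+1)) = PySem.List.slice l (some a) (some b) := by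
  rw [PySem.List.slice_toNat _ (by omega) (by omega), PySem.List.slice_toNat _ ha hb]
  have h1 : (a+1).toNat = a.toNat + 1 := by omega
  rw [h1]
  have h2 : (b+1).toNat - (a.toNat + 1) = b.toNat - a.toNat := by omega
  rw [h2, List.drop_succ_cons]

theorem outMap_shift (y : String) (l : List String) (S : List Int)
    (hS : ∀ a ∈ S, 0 ≤ a) :
    outMap (y :: l) (S.map (· + 1)) = outMap l S := by
  unfold outMap
  have htail : (S.map (· + 1)).tail = S.tail.map (· + 1) := by cases S <;> simp
  have hlen : ((y :: l).length : Int) = (l.length : Int) + 1 := by simp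
  rw [htail, hlen]
  have hends : S.tail.map (· + 1) ++ [(l.length : Int) + 1]
      = (S.tail ++ [(l.length : Int)]).map (· + 1) := by simp
  rw [hends, List.zip_map, List.map_map]
  apply List.map_congr_left
  intro p hp
  obtain ⟨a, b⟩ := p
  obtain ⟨hp1, hp2⟩ := List.of_mem_zip hp
  have ha : 0 ≤ a := hS _ hp1
  have hb : 0 ≤ b := by
    rcases List.mem_append.1 hp2 with h | h
    · exact hS _ (List.mem_of_mem_tail h)
    · simp at h; omega
  simp [slice_shift y l a b ha hb]

theorem headD_map_add_one (S : List Int) (d : Int) :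
    (S.map (· + 1)).headD (d + 1) = S.headD d + 1 := by cases S <;> simp

theorem zip_cons_headD {α : Type} (c e : α) (S : List α) :
    (c :: S).zip (S ++ [e]) = (c, S.headD e) :: S.zip (S.tail ++ [e]) := by
  cases S <;> simp

theorem take_takeWhile_len {α : Type} (p : α → Bool) (l : List α) :
    l.take (l.takeWhile p).length = l.takeWhile p :=
  ((List.prefix_iff_eq_take).1 (List.takeWhile_prefix p)).symm

theorem alt_cons_neg (y : String) (l : List String) (h : swcP y = false) :
    statements_alt (y :: l) = statements_alt l := by
  rw [alt_unfold, alt_unfold, SF_cons, if_neg (by simp [h]),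
    show (0:Int)+1 = 0+1 from rfl, SF_succ l 0,
    outMap_shift y l _ (SF_nonneg l 0 · le_rfl)]

theorem alt_cons_pos (x : String) (l : List String) (h : swcP x = true) :
    statements_alt (x :: l) =
      joinS (x :: l.takeWhile (fun y => !swcP y)) :: statements_alt l := by
  rw [alt_unfold, alt_unfold, SF_cons, if_pos h, SF_succ l 0]
  unfold outMap
  have htail : ((0:Int) :: (SF 0 l).map (· + 1)).tail = (SF 0 l).map (· + 1) := rfl
  rw [htail, zip_cons_headD, List.map_cons]
  congr 1
  · -- first statement
    have hhead : ((SF 0 l).map (· + 1)).headD (((x :: l).length : Int))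
        = (SF 0 l).headD ((l.length : Int)) + 1 := by
      have : ((x :: l).length : Int) = (l.length : Int) + 1 := by simp
      rw [this, headD_map_add_one]
    set m : Int := (SF 0 l).headD ((l.length : Int)) with hm
    have hm0 : m = ((l.takeWhile (fun y => !swcP y)).length : Int) := by
      rw [hm]
      simpa using SF_head l 0
    have hmnn : 0 ≤ m := by rw [hm0]; positivity
    rw [hhead]
    have hslice : PySem.List.slice (x :: l) (some 0) (some (m+1))
        = x :: l.take m.toNat := by
      rw [PySem.List.slice_toNat _ le_rfl (by omega)]
      simp only [Int.toNat_zero, Nat.sub_zero, List.drop_zero]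
      rw [show (m+1).toNat = m.toNat + 1 by omega, List.take_succ_cons]
    rw [hslice]
    have : l.take m.toNat = l.takeWhile (fun y => !swcP y) := by
      rw [hm0]
      simp [take_takeWhile_len]
    rw [this]
    rfl
  · -- remaining statements
    have h1 := outMap_shift x l (SF 0 l) (SF_nonneg l 0 · le_rfl)
    unfold outMap at h1
    exact h1

-- A-side characterisation
def stmtsIn : List String → List String → List (List String)
  | acc, [] => [acc]
  | acc, x :: xs => if swcP x then acc :: stmtsIn [x] xs else stmtsIn (acc ++ [x]) xs

theorem loop_true (l : List String) : ∀ acc out,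
    statementsLoop l true acc out = out ++ (stmtsIn acc l).map joinS := by
  induction l with
  | nil => intro acc out; simp [statementsLoop, stmtsIn, joinS]
  | cons x xs ih =>
      intro acc out
      by_cases h : swcP x
      · simp [statementsLoop, h, ih, stmtsIn, joinS]
      · simp [statementsLoop, h, ih, stmtsIn]

theorem stmts_cons_neg (y : String) (l : List String) (h : swcP y = false) :
    statements (y :: l) = statements l := by
  simp [statements, statementsLoop, h]

theorem stmts_cons_pos_loop (x : String) (l : List String) (h : swcP x = true) :
    statements (x :: l) = (stmtsIn [x] l).map joinS := by
  simp [statements, statementsLoop, h, loop_true]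

theorem stmts_skip (l : List String) :
    statements l = statements (l.dropWhile (fun y => !swcP y)) := by
  induction l with
  | nil => rfl
  | cons y l ih =>
      by_cases h : swcP y
      · simp [List.dropWhile_cons, h]
      · rw [stmts_cons_neg y l (by simpa using h), ih]
        simp [List.dropWhile_cons, h]

theorem stmtsIn_split (l : List String) : ∀ acc,
    stmtsIn acc l = (acc ++ l.takeWhile (fun y => !swcP y)) ::
      (match l.dropWhile (fun y => !swcP y) with
        | [] => []
        | z :: zs => stmtsIn [z] zs) := by
  induction l with
  | nil => intro acc; simp [stmtsIn]
  | cons x xs ih =>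
      intro acc
      by_cases h : swcP x
      · simp [stmtsIn, h, List.takeWhile_cons, List.dropWhile_cons]
      · rw [show stmtsIn acc (x :: xs) = stmtsIn (acc ++ [x]) xs by simp [stmtsIn, h], ih]
        simp [List.takeWhile_cons, List.dropWhile_cons, h]

theorem dropWhile_head_false {α : Type} (p : α → Bool) :
    ∀ (l : List α) (z : α) (zs : List α), l.dropWhile p = z :: zs → p z = false := by
  intro l
  induction l with
  | nil => intro z zs h; simp at h
  | cons a l ih =>
      intro z zs h
      rw [List.dropWhile_cons] at h
      by_cases hp : p a
      · exact ih z zs (by simpa [hp] using h)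
      · simp only [hp, if_false] at h
        injection h with h1 h2
        subst h1
        simpa using hp

theorem stmts_cons_pos (x : String) (l : List String) (h : swcP x = true) :
    statements (x :: l) =
      joinS (x :: l.takeWhile (fun y => !swcP y)) :: statements l := by
  rw [stmts_cons_pos_loop x l h, stmtsIn_split l [x], List.map_cons, stmts_skip l]
  congr 1
  cases hd : l.dropWhile (fun y => !swcP y) with
  | nil => rfl
  | cons z zs =>
      have hz : swcP z = true := by
        have := dropWhile_head_false (fun y => !swcP y) l z zs hd
        simpa using this
      rw [stmts_cons_pos_loop z zs hz]

theorem main_eq (l : List String) : statements l = statements_alt l := by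
  induction l with
  | nil => rfl
  | cons x l ih =>
      by_cases h : swcP x
      · rw [stmts_cons_pos x l h, alt_cons_pos x l h, ih]
      · rw [stmts_cons_neg x l (by simpa using h), alt_cons_neg x l (by simpa using h), ih]

-- ===== VERDICT (by name: the statement is the Claim_ definition above) =====
theorem statements_spec : Claim_equal_statements := by
  intro f _
  unfold Spec_statements
  exact main_eq f
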